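-- pv_equiv track=rewrite | github.com/elementsix/cs61a | hw03/hw03.py | has_seven
-- ===== SOURCE A (Python) =====
-- def has_seven(k):
--     """Returns True if at least one of the digits of k is a 7, False otherwise.
--
--     >>> has_seven(3)
--     False
--     >>> has_seven(7)
--     True
--     >>> has_seven(2734)
--     True
--     >>> has_seven(2634)
--     False
--     >>> has_seven(734)
--     True
--     >>> has_seven(7777)
--     True
--     """
--     "*** YOUR CODE HERE ***"
--     if k == 0:
--         return False
--
--     if k % 10 == 7:
--         return True
--     else:
--         return has_seven(k//10)
-- ===== SOURCE B (Python) =====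
-- def has_seven(k):
--     """Returns True if at least one of the digits of k is a 7, False otherwise."""
--     digits = []
--     while k:
--         digits.append(k % 10)
--         k //= 10
--     return 7 in digits
-- ===== Notes on version B (the rewrite author's own statement) =====
-- stated objective: alternative
-- what changed: Replaces A's early-exit recursion with a two-phase iterative version: first collect all decimal digits into a list, then test membership of 7 in that list.
-- outside the precondition, e.g. on has_seven(-3): A returns True, B does not finish within the time limit; on has_seven(-1): A raises RecursionError, B does not finish within the time limit
import Mathlib
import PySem

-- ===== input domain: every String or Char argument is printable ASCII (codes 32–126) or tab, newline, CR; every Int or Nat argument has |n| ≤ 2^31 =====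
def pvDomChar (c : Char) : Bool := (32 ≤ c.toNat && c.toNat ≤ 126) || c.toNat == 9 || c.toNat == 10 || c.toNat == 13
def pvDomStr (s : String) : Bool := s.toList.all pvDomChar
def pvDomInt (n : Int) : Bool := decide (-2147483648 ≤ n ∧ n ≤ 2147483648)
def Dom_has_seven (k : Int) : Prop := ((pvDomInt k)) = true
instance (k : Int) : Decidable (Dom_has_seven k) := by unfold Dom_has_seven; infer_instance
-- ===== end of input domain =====

-- B replaces A's early-exit recursion by a two-phase loop (collect the decimal digits, then test membership of 7); same cost, different decomposition.


-- ===== PORT A =====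
-- literal port of A's recursion; the 'k < 0' branch is only a totality guard:
-- Python never returns through it (negative k is outside Pre_has_seven).
def has_seven (k : Int) : Bool :=
  if k = 0 then false
  else if PySem.Int.mod k 10 = 7 then true
  else if k < 0 then false
  else has_seven (PySem.Int.floordiv k 10)
termination_by k.toNat
decreasing_by
  rw [PySem.Int.floordiv_eq_ediv_of_pos (by norm_num : (0:Int) < 10)]
  omega

-- ===== PORT B =====
-- the while-loop of Source B collecting digits into `acc`; the 'k < 0' branch is a
-- totality guard: Python's loop never terminates there (outside Pre_has_seven).
def digitsOf (k : Int) (acc : List Int) : List Int :=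
  if k = 0 then acc
  else if k < 0 then acc
  else digitsOf (PySem.Int.floordiv k 10) (acc ++ [PySem.Int.mod k 10])
termination_by k.toNat
decreasing_by
  rw [PySem.Int.floordiv_eq_ediv_of_pos (by norm_num : (0:Int) < 10)]
  omega

def has_seven_alt (k : Int) : Bool := (digitsOf k []).contains 7

-- ===== PRECONDITION & SPEC =====
-- Pre_ excludes negative k: A's recursion never reaches 0 there — it raises
-- RecursionError unless floor-mod happens to yield 7 first (an artefact of Python's floor-mod on
-- negatives, returning True for numbers with no digit 7), and B's digit-collecting
-- loop does not terminate on any negative k.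
def Pre_has_seven (k : Int) : Prop := 0 ≤ k
instance (k : Int) : Decidable (Pre_has_seven k) := by unfold Pre_has_seven; infer_instance
def pvWitness_has_seven : Int := (7)

def Spec_has_seven (k : Int) (out : Bool) : Prop := out = has_seven_alt k
instance (k : Int) (out : Bool) : Decidable (Spec_has_seven k out) := by unfold Spec_has_seven; infer_instance

-- ===== CLAIM (what is proved, stated in full; the proofs are below) =====
def Claim_equal_has_seven : Prop := ∀ (k : Int), Dom_has_seven k → Pre_has_seven k → Spec_has_seven k (has_seven k)

-- ===== LEMMAS AND PROOFS =====

-- loop invariant: collecting the digits and then testing membership of 7 gives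
-- exactly A's early-exit answer, joined by || with whatever acc already holds.
theorem digitsOf_contains : ∀ (n : Nat) (k : Int), k.toNat = n → 0 ≤ k →
    ∀ acc : List Int, (digitsOf k acc).contains 7 = (acc.contains 7 || has_seven k) := by
  intro n
  induction n using Nat.strong_induction_on with
  | _ n ih =>
    intro k hn hk acc
    rw [digitsOf, has_seven]
    by_cases h0 : k = 0
    · simp [h0]
    · have hkpos : 0 < k := lt_of_le_of_ne hk (Ne.symm h0)
      have hneg : ¬ k < 0 := by omega
      have hdiv : PySem.Int.floordiv k 10 = k / 10 :=
        PySem.Int.floordiv_eq_ediv_of_pos (by norm_num)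
      have hrec := ih (k / 10).toNat (by rw [hdiv] at *; omega) (k / 10) rfl (by omega)
          (acc ++ [PySem.Int.mod k 10])
      have hmod : PySem.Int.mod k 10 = k % 10 := PySem.Int.mod_eq_emod_of_pos (by norm_num)
      by_cases h7 : PySem.Int.mod k 10 = 7
      · rw [if_neg h0, if_neg hneg, if_neg h0, if_pos h7, hdiv, hrec]
        rw [hmod] at h7
        simp
        exact Or.inl (Or.inr h7.symm)
      · rw [if_neg h0, if_neg hneg, if_neg h0, if_neg h7, hdiv, hrec]
        have h7' : ¬ (7:Int) = k % 10 := by rw [hmod] at h7; omega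
        simp [h7', hneg]

-- ===== VERDICT (by name: the statement is the Claim_ definition above) =====
theorem has_seven_spec : Claim_equal_has_seven := by
  intro k _ hpre
  unfold Spec_has_seven has_seven_alt
  rw [digitsOf_contains k.toNat k rfl hpre []]
  simp
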